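-- pv_equiv track=rewrite | github.com/bluetoonist/Various_Source | Example02.py | get_divide_range
-- ===== SOURCE A (Python) =====
-- def get_divide_range(num, p):
--     result = 0
--     list1 = []
--     allocate = int(num / p)
--
--     for x in range(p):
--         list1.append(allocate)
--     list1[p - 1] += (num % p)
--
--     for x, y in zip(list1, range(0, len(list1) + 1)):
--         result += x
--         list1[y] = result
--     return list1
-- ===== SOURCE B (Python) =====
-- def get_divide_range(num, p):
--     allocate = int(num / p)
--     result = [allocate * (i + 1) for i in range(p)]
--     result[p - 1] += num % p
--     return result
-- ===== Notes on version B (the rewrite author's own statement) =====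
-- stated objective: simpler
-- what changed: Replaces the fill-then-in-place-accumulate two-loop scheme with a direct closed-form comprehension of the prefix sums plus one final bump of the last bucket.
import Mathlib
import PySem

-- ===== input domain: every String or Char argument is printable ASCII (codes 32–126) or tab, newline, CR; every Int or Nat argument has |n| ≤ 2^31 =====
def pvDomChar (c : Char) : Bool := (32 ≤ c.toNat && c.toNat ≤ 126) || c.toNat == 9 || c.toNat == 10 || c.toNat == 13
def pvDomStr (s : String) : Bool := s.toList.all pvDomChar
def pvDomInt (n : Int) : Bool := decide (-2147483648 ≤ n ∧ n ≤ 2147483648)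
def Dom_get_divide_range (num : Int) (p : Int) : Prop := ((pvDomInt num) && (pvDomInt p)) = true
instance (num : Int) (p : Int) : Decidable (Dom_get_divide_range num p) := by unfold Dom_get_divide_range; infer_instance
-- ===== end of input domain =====

-- B replaces A's fill-then-in-place-accumulate two-loop scheme by a closed-form comprehension
-- of the prefix sums plus one bump of the last bucket (objective: simpler).

-- ===== PORT A =====
-- int(num / p) is exact truncating division here: within Dom (|num|, |p| ≤ 2^31 < 2^53)
-- the float quotient truncates to the exact truncated quotient (PySem.Int.truncdiv's stated domain).
def get_divide_range (num : Int) (p : Int) : List Int :=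
  let allocate := PySem.Int.truncdiv num p
  let list1 := (PySem.List.pyRange 0 p 1).foldl (fun acc _ => acc ++ [allocate]) []
  let list1 := PySem.List.pySetD list1 (p - 1)
      (PySem.List.pyGetD list1 (p - 1) 0 + PySem.Int.mod num p)
  -- zip reads list1[i] before the iteration writes list1[i], and earlier writes hit
  -- smaller indices only, so the x's read are the ORIGINAL elements: fold over the
  -- original list zipped with the range, threading (result, list1).
  let st := (list1.zip (PySem.List.pyRange 0 ((list1.length : Int) + 1) 1)).foldl
      (fun (st : Int × List Int) xy =>
        let result := st.1 + xy.1
        (result, PySem.List.pySetD st.2 xy.2 result)) ((0 : Int), list1)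
  st.2

-- ===== PORT B =====
def get_divide_range_alt (num : Int) (p : Int) : List Int :=
  let allocate := PySem.Int.truncdiv num p
  let result := (PySem.List.pyRange 0 p 1).map (fun i => allocate * (i + 1))
  PySem.List.pySetD result (p - 1)
      (PySem.List.pyGetD result (p - 1) 0 + PySem.Int.mod num p)

-- ===== PRECONDITION & SPEC =====
-- A raises ZeroDivisionError for p = 0 and IndexError for p < 0; Pre_ excludes exactly those.
def Pre_get_divide_range (num : Int) (p : Int) : Prop := 1 ≤ p
instance (num : Int) (p : Int) : Decidable (Pre_get_divide_range num p) := by unfold Pre_get_divide_range; infer_instance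
def pvWitness_get_divide_range : Int × Int := (10, 3)

def Spec_get_divide_range (num : Int) (p : Int) (out : List Int) : Prop := out = get_divide_range_alt num p
instance (num : Int) (p : Int) (out : List Int) : Decidable (Spec_get_divide_range num p out) := by unfold Spec_get_divide_range; infer_instance

-- ===== CLAIM (what is proved, stated in full; the proofs are below) =====
def Claim_equal_get_divide_range : Prop := ∀ (num : Int) (p : Int), Dom_get_divide_range num p → Pre_get_divide_range num p → Spec_get_divide_range num p (get_divide_range num p)

-- ===== LEMMAS AND PROOFS =====

-- prefix sums of ys starting from accumulator acc
def psum (acc : Int) : List Int → List Int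
  | [] => []
  | y :: t => (acc + y) :: psum (acc + y) t

theorem set_append_cons (pre : List Int) (y r : Int) (t : List Int) :
    (pre ++ y :: t).set pre.length r = pre ++ r :: t := by
  induction pre with
  | nil => rfl
  | cons a pre ih => simp [ih]

-- A's accumulate loop, generalized: state (acc, pre ++ ys), indices pre.length, pre.length+1, …
theorem loop_psum (ys : List Int) : ∀ (pre : List Int) (acc : Int) (tl : List Int),
    ((ys.zip (((List.range' pre.length ys.length).map (fun n : Nat => (n : Int))) ++ tl)).foldl
      (fun (st : Int × List Int) xy =>
        let result := st.1 + xy.1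
        (result, PySem.List.pySetD st.2 xy.2 result)) (acc, pre ++ ys)).2
    = pre ++ psum acc ys := by
  induction ys with
  | nil => intro pre acc tl; simp [psum]
  | cons y t ih =>
    intro pre acc tl
    have hr : List.range' pre.length (y :: t).length = pre.length :: List.range' (pre.length + 1) t.length := by
      simp [List.range'_succ]
    rw [hr]
    simp only [List.map_cons, List.cons_append, List.zip_cons_cons, List.foldl_cons]
    have hset : PySem.List.pySetD (pre ++ y :: t) ((pre.length : Nat) : Int) (acc + y) = pre ++ (acc + y) :: t := by
      rw [PySem.List.pySetD_natCast, set_append_cons]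
    simp only [hset]
    have h2 := ih (pre ++ [acc + y]) (acc + y) tl
    have hl : (pre ++ [acc + y]).length = pre.length + 1 := by simp
    rw [hl] at h2
    rw [show (pre ++ [acc + y]) ++ t = pre ++ (acc + y) :: t by simp] at h2
    rw [h2]
    simp [psum]

theorem psum_replicate_last (a m : Int) : ∀ (k : Nat) (acc : Int),
    psum acc (List.replicate k a ++ [a + m])
      = (List.range k).map (fun i : Nat => acc + a * ((i : Int) + 1)) ++ [acc + a * (k : Int) + (a + m)] := by
  intro k
  induction k with
  | zero => intro acc; simp [psum]
  | succ n ih =>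
    intro acc
    rw [List.replicate_succ, List.cons_append]
    show (acc + a) :: psum (acc + a) (List.replicate n a ++ [a + m]) = _
    rw [ih (acc + a), List.range_succ_eq_map]
    simp only [List.map_cons, List.map_map, List.cons_append]
    have h1 : acc + a = acc + a * ((0 : Nat) + 1 : Int) := by norm_num
    have h2 : ((List.range n).map (fun i : Nat => acc + a + a * ((i : Int) + 1)))
        = (List.range n).map ((fun i : Nat => acc + a * ((i : Int) + 1)) ∘ Nat.succ) := by
      apply List.map_congr_left; intro i _
      simp only [Function.comp]
      push_cast; ring
    have h3 : acc + a + a * (n : Int) + (a + m) = acc + a * ((n : Nat).succ : Int) + (a + m) := by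
      push_cast; ring
    rw [h3, ← h2, ← h1]

theorem get_divide_range_spec' (num p : Int) (hp : 1 ≤ p) :
    get_divide_range num p = get_divide_range_alt num p := by
  obtain ⟨n, hn⟩ : ∃ n : Nat, p = (n : Int) := ⟨p.toNat, by omega⟩
  obtain ⟨k, hk⟩ : ∃ k : Nat, n = k + 1 := ⟨n - 1, by omega⟩
  subst hk; subst hn
  simp only [get_divide_range, get_divide_range_alt]
  generalize PySem.Int.truncdiv num ((k + 1 : Nat) : Int) = a
  generalize PySem.Int.mod num ((k + 1 : Nat) : Int) = m
  -- the fill loop produces replicate (k+1) a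
  have hfill : (PySem.List.pyRange 0 ((k + 1 : Nat) : Int) 1).foldl
      (fun acc _ => acc ++ [a]) [] = List.replicate (k + 1) a := by
    rw [PySem.List.foldl_append_singleton_eq_map, PySem.List.pyRange_one]
    have h1 : (((k + 1 : Nat) : Int) - 0).toNat = k + 1 := by omega
    rw [h1, List.map_map]
    simp [Function.comp_def, List.map_const']
  rw [hfill]
  have hidx : ((k + 1 : Nat) : Int) - 1 = ((k : Nat) : Int) := by push_cast; ring
  -- A's list after bumping the last slot
  have hbump : PySem.List.pySetD (List.replicate (k + 1) a) (((k + 1 : Nat) : Int) - 1)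
      (PySem.List.pyGetD (List.replicate (k + 1) a) (((k + 1 : Nat) : Int) - 1) 0 + m)
      = List.replicate k a ++ [a + m] := by
    rw [hidx, PySem.List.pySetD_natCast]
    have hget : PySem.List.pyGetD (List.replicate (k + 1) a) ((k : Nat) : Int) 0 = a := by
      rw [PySem.List.pyGetD_natCast]
      simp
    rw [hget, List.replicate_succ']
    have h := set_append_cons (List.replicate k a) a (a + m) []
    simp only [List.length_replicate] at h
    exact h
  rw [hbump]
  have hlen : (List.replicate k a ++ [a + m]).length = k + 1 := by simp
  rw [hlen]
  -- the index range of the accumulate loop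
  have hzip : PySem.List.pyRange 0 (((k + 1 : Nat) : Int) + 1) 1
      = ((List.range' 0 (k + 1)).map (fun n : Nat => (n : Int))) ++ [((k + 1 : Nat) : Int)] := by
    rw [PySem.List.pyRange_one]
    have h1 : ((((k + 1 : Nat) : Int) + 1) - 0).toNat = (k + 1) + 1 := by omega
    rw [h1, ← List.range_eq_range', List.range_succ]
    simp
  rw [hzip]
  have hA := loop_psum (List.replicate k a ++ [a + m]) [] 0 [((k + 1 : Nat) : Int)]
  simp only [List.length_nil, hlen, List.nil_append] at hA
  rw [hA, psum_replicate_last a m k 0]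
  -- B's side
  rw [hidx, PySem.List.pyRange_one]
  have h1 : (((k + 1 : Nat) : Int) - 0).toNat = k + 1 := by omega
  rw [h1, List.map_map]
  have hB : (List.range (k + 1)).map ((fun i => a * (i + 1)) ∘ fun n : Nat => (0 : Int) + (n : Int))
      = (List.range k).map (fun i : Nat => a * ((i : Int) + 1)) ++ [a * ((k : Int) + 1)] := by
    rw [List.range_succ]
    simp [Function.comp_def]
  rw [hB]
  have hgetB : PySem.List.pyGetD ((List.range k).map (fun i : Nat => a * ((i : Int) + 1))
      ++ [a * ((k : Int) + 1)]) ((k : Nat) : Int) 0 = a * ((k : Int) + 1) := by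
    rw [PySem.List.pyGetD_natCast]
    simp
  rw [hgetB, PySem.List.pySetD_natCast]
  have hsetB := set_append_cons ((List.range k).map (fun i : Nat => a * ((i : Int) + 1)))
      (a * ((k : Int) + 1)) (a * ((k : Int) + 1) + m) []
  simp only [List.length_map, List.length_range] at hsetB
  rw [hsetB]
  congr 1
  · apply List.map_congr_left; intro i _; ring
  · congr 1; ring

-- ===== VERDICT (by name: the statement is the Claim_ definition above) =====
theorem get_divide_range_spec : Claim_equal_get_divide_range := by
  intro num p _ hp
  exact get_divide_range_spec' num p hp
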